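-- pv_equiv track=rewrite | github.com/FloHauss/XMC_HTC | htc/hbgl/main/tree_split.py | k_merger
-- ===== SOURCE A (Python) =====
-- import copy
--
-- def tree_merge(tree_1, tree_2):
--     merger = copy.deepcopy(tree_1)
--     for k, v in tree_2.items():
--         if k in merger.keys():
--             merger[k] = list(set(merger[k] + v))
--         else:
--             merger[k] = v
--     return merger
--
-- def flatten_tree(tree):
--     nodes = set()
--     for k, v in tree.items():
--         nodes.add(k)
--         for child in v:
--             nodes.add(child)
--     return nodes
--
-- def k_merger(k, sub_trees):
--     merged_trees = []
--     current_tree = {}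
--     while sub_trees:
--         merged_tree = tree_merge(current_tree, sub_trees[0])
--         if len(flatten_tree(merged_tree)) <= k:
--             current_tree = merged_tree
--             sub_trees.pop(0)
--         else:
--             merged_trees.append(current_tree)
--             current_tree = {}
--     if current_tree:
--         merged_trees.append(current_tree)
--     return merged_trees
-- ===== SOURCE B (Python) =====
-- # B: single forward pass with an incrementally maintained node set; counts only the
-- # newly added nodes of each subtree instead of re-merging and re-flattening the whole
-- # current tree on every step. Note: A additionally empties the sub_trees list in place
-- # (pop(0) in a while loop); B does not mutate its argument — return value is identical.
-- def k_merger(k, sub_trees):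
--     merged_trees = []
--     cur = {}
--     nodes = set()
--     for tree in sub_trees:
--         extra = set(tree)
--         for vs in tree.values():
--             extra.update(vs)
--         grown = len(nodes) + sum(1 for x in extra if x not in nodes)
--         if cur and grown > k:
--             merged_trees.append(cur)
--             cur = {}
--             nodes = set()
--         for key, vs in tree.items():
--             if key in cur:
--                 cur[key] = list(dict.fromkeys(cur[key] + vs))
--             else:
--                 cur[key] = list(vs)
--         nodes.update(extra)
--     if cur:
--         merged_trees.append(cur)
--     return merged_trees
-- ===== Notes on version B (the rewrite author's own statement) =====
-- stated objective: faster
-- what changed: A repeatedly deepcopy-merges the whole current tree and re-flattens it from scratch on every while-step (re-visiting a rejected subtree a second time); B makes one forward pass, keeps the running node set incrementally and counts only each subtree's newly added nodes, flushing the current group when the count would exceed k. Pre_ excludes subtrees whose key sets overlap (there A's merged child-list order is CPython set-hash iteration order, an accident) and inputs containing a subtree with more than k distinct nodes (there A loops forever).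
-- outside the precondition, e.g. on k_merger(10, [{1: [3]}, {1: [2]}]): A returns [{1: [2, 3]}], B returns [{1: [3, 2]}]
import Mathlib
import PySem

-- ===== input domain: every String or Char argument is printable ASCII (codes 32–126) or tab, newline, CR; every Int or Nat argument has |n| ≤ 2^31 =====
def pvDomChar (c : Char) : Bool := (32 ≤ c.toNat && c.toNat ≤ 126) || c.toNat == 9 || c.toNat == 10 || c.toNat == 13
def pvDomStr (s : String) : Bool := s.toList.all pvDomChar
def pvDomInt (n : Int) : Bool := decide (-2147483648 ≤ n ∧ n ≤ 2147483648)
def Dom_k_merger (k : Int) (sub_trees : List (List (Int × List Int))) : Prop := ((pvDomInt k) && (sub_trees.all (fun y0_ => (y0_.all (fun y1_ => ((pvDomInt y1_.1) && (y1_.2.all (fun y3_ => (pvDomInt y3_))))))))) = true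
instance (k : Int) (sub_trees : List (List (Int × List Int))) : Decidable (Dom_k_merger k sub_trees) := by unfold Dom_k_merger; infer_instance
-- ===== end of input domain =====

-- B replaces A's deepcopy-merge-and-reflatten while loop by a single forward pass with an
-- incrementally maintained node set (one pass instead of repeated re-merge and re-flatten). Return
-- values agree on Pre_; side effects differ: Python A empties its sub_trees argument in place (pop(0)), B does not mutate it.

-- ===== PORT A =====
-- tree_merge(tree_1, tree_2); copy.deepcopy(tree_1) is value semantics in Lean.
-- list(set(a + b)) is ported as first-insertion-order dedup (PySem.Set.ofList); Python's set
-- iteration order is not modelled, so this line is exact only where the branch is unreachable,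
-- which Pre_ guarantees (pairwise disjoint key sets).
def treeMerge (t1 t2 : PySem.Dict Int (List Int)) : PySem.Dict Int (List Int) :=
  t2.items.foldl (fun m kv =>
    if m.contains kv.1 then m.insert kv.1 (PySem.Set.ofList (m.getD kv.1 [] ++ kv.2))
    else m.insert kv.1 kv.2) t1

-- flatten_tree: nodes = set(); for k, v in tree.items(): nodes.add(k); for child in v: nodes.add(child)
def flattenTree (t : PySem.Dict Int (List Int)) : PySem.Set Int :=
  t.items.foldl (fun s kv => kv.2.foldl (fun s2 c => PySem.Set.add s2 c) (PySem.Set.add s kv.1)) PySem.Set.empty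

-- the while loop; each subtree is visited at most twice (reject then accept), so fuel
-- 2*|sub_trees|+1 is never exhausted on Pre_ inputs (outside Pre_ the Python can loop forever).
def kLoopA (k : Int) (fuel : Nat) (merged : List (PySem.Dict Int (List Int)))
    (cur : PySem.Dict Int (List Int)) (rest : List (PySem.Dict Int (List Int))) :
    List (PySem.Dict Int (List Int)) :=
  match rest, fuel with
  | [], _ => if cur.items.isEmpty then merged else merged ++ [cur]
  | _ :: _, 0 => merged
  | t :: rest', fuel' + 1 =>
      let m := treeMerge cur t
      if ((flattenTree m).length : Int) ≤ k then kLoopA k fuel' merged m rest'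
      else kLoopA k fuel' (merged ++ [cur]) PySem.Dict.empty (t :: rest')

def k_merger (k : Int) (sub_trees : List (List (Int × List Int))) : List (List (Int × List Int)) :=
  (kLoopA k (2 * sub_trees.length + 1) [] PySem.Dict.empty (sub_trees.map PySem.Dict.ofList)).map PySem.Dict.items

-- ===== PORT B =====
-- extra = set(tree); for vs in tree.values(): extra.update(vs)
def bExtra (t : PySem.Dict Int (List Int)) : PySem.Set Int :=
  t.values.foldl (fun s vs => PySem.Set.update s vs) (PySem.Set.ofList t.keys)

-- for key, vs in tree.items(): cur[key] = list(dict.fromkeys(cur[key] + vs)) if key in cur else list(vs)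
def bMergeIn (cur t : PySem.Dict Int (List Int)) : PySem.Dict Int (List Int) :=
  t.items.foldl (fun c kv =>
    if c.contains kv.1 then c.insert kv.1 (PySem.List.dedup (c.getD kv.1 [] ++ kv.2))
    else c.insert kv.1 kv.2) cur

-- one iteration of B's for loop over the state (merged_trees, cur, nodes)
def bStep (k : Int)
    (acc : List (PySem.Dict Int (List Int)) × PySem.Dict Int (List Int) × PySem.Set Int)
    (t : PySem.Dict Int (List Int)) :
    List (PySem.Dict Int (List Int)) × PySem.Dict Int (List Int) × PySem.Set Int :=
  let extra := bExtra t
  let grown : Int := (acc.2.2.length : Int) + (extra.countP (fun x => !(PySem.Set.contains acc.2.2 x)) : Int)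
  let acc' := if !acc.2.1.items.isEmpty && decide (k < grown)
              then (acc.1 ++ [acc.2.1], PySem.Dict.empty, PySem.Set.empty) else acc
  (acc'.1, bMergeIn acc'.2.1 t, PySem.Set.update acc'.2.2 extra)

def k_merger_alt (k : Int) (sub_trees : List (List (Int × List Int))) : List (List (Int × List Int)) :=
  let fin := (sub_trees.map PySem.Dict.ofList).foldl (bStep k) ([], PySem.Dict.empty, PySem.Set.empty)
  (if fin.2.1.items.isEmpty then fin.1 else fin.1 ++ [fin.2.1]).map PySem.Dict.items

-- ===== PRECONDITION & SPEC =====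
-- Pre_ excludes (a) inputs containing a subtree with more than k distinct nodes — on those A's
-- while loop never terminates — and (b) inputs whose subtrees have overlapping key sets: there
-- A's merged child lists are ordered by CPython's set-hash iteration order, an accident of A's
-- implementation that no deterministic port can reproduce (B keeps first-occurrence order).
def Pre_k_merger (k : Int) (sub_trees : List (List (Int × List Int))) : Prop :=
  (∀ t ∈ sub_trees,
      ((PySem.Set.ofList ((PySem.Dict.ofList t).keys ++ (PySem.Dict.ofList t).values.flatten)).length : Int) ≤ k) ∧
  List.Pairwise (fun a b => ∀ p ∈ a, ∀ q ∈ b, p.1 ≠ q.1) sub_trees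
instance (k : Int) (sub_trees : List (List (Int × List Int))) : Decidable (Pre_k_merger k sub_trees) := by
  unfold Pre_k_merger; infer_instance

def pvWitness_k_merger : Int × (List (List (Int × List Int))) := (3, [[(1, [2])], [(4, [5, 2])]])

def Spec_k_merger (k : Int) (sub_trees : List (List (Int × List Int))) (out : List (List (Int × List Int))) : Prop := out = k_merger_alt k sub_trees
instance (k : Int) (sub_trees : List (List (Int × List Int))) (out : List (List (Int × List Int))) : Decidable (Spec_k_merger k sub_trees out) := by unfold Spec_k_merger; infer_instance

-- ===== CLAIM (what is proved, stated in full; the proofs are below) =====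
def Claim_equal_k_merger : Prop := ∀ (k : Int) (sub_trees : List (List (Int × List Int))), Dom_k_merger k sub_trees → Pre_k_merger k sub_trees → Spec_k_merger k sub_trees (k_merger k sub_trees)

-- ===== LEMMAS AND PROOFS =====

theorem mem_foldl_update {l : List (List Int)} {s : PySem.Set Int} {x : Int} :
    x ∈ l.foldl (fun s vs => PySem.Set.update s vs) s ↔ x ∈ s ∨ ∃ vs ∈ l, x ∈ vs := by
  induction l generalizing s with
  | nil => simp
  | cons vs l ih => simp [ih, PySem.Set.mem_update, or_assoc]

theorem nodup_foldl_update {l : List (List Int)} {s : PySem.Set Int} (h : s.Nodup) :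
    (l.foldl (fun s vs => PySem.Set.update s vs) s).Nodup := by
  induction l generalizing s with
  | nil => exact h
  | cons vs l ih => exact ih (PySem.Set.nodup_update _ _ h)

theorem mem_bExtra {t : PySem.Dict Int (List Int)} {x : Int} :
    x ∈ bExtra t ↔ ∃ p ∈ t.items, x = p.1 ∨ x ∈ p.2 := by
  rw [bExtra, mem_foldl_update]
  simp only [PySem.Set.mem_ofList, PySem.Dict.keys, PySem.Dict.values, List.mem_map]
  aesop

theorem nodup_bExtra (t : PySem.Dict Int (List Int)) : (bExtra t).Nodup :=
  nodup_foldl_update (PySem.Set.nodup_ofList _)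

theorem flat_fold_mem {l : List (Int × List Int)} {s : PySem.Set Int} {x : Int} :
    x ∈ l.foldl (fun s kv => kv.2.foldl (fun s2 c => PySem.Set.add s2 c) (PySem.Set.add s kv.1)) s ↔
      x ∈ s ∨ ∃ p ∈ l, x = p.1 ∨ x ∈ p.2 := by
  induction l generalizing s with
  | nil => simp
  | cons kv l ih =>
    rw [List.foldl_cons, ih,
        show kv.2.foldl (fun s2 c => PySem.Set.add s2 c) (PySem.Set.add s kv.1) = PySem.Set.update (PySem.Set.add s kv.1) kv.2 from rfl]
    simp [PySem.Set.mem_update, PySem.Set.mem_add]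
    aesop

theorem mem_flattenTree {t : PySem.Dict Int (List Int)} {x : Int} :
    x ∈ flattenTree t ↔ ∃ p ∈ t.items, x = p.1 ∨ x ∈ p.2 := by
  rw [flattenTree, flat_fold_mem]; simp [PySem.Set.empty]

theorem flat_fold_nodup {l : List (Int × List Int)} {s : PySem.Set Int} (h : s.Nodup) :
    (l.foldl (fun s kv => kv.2.foldl (fun s2 c => PySem.Set.add s2 c) (PySem.Set.add s kv.1)) s).Nodup := by
  induction l generalizing s with
  | nil => exact h
  | cons kv l ih =>
    rw [List.foldl_cons,
        show kv.2.foldl (fun s2 c => PySem.Set.add s2 c) (PySem.Set.add s kv.1) = PySem.Set.update (PySem.Set.add s kv.1) kv.2 from rfl]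
    exact ih (PySem.Set.nodup_update _ _ (PySem.Set.nodup_add _ _ h))

theorem nodup_flattenTree (t : PySem.Dict Int (List Int)) : (flattenTree t).Nodup :=
  flat_fold_nodup List.nodup_nil

theorem bMergeIn_eq (cur t : PySem.Dict Int (List Int)) : bMergeIn cur t = treeMerge cur t := by
  simp [bMergeIn, treeMerge]

theorem mergeStep_flat (m : PySem.Dict Int (List Int)) (kv : Int × List Int) (h : m.keys.Nodup) (x : Int) :
    x ∈ flattenTree (if m.contains kv.1 then m.insert kv.1 (PySem.Set.ofList (m.getD kv.1 [] ++ kv.2)) else m.insert kv.1 kv.2) ↔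
      x ∈ flattenTree m ∨ x = kv.1 ∨ x ∈ kv.2 := by
  by_cases hc : m.contains kv.1
  · simp only [hc, if_true]
    obtain ⟨old, hold⟩ : ∃ old, m.get? kv.1 = some old := by
      have := PySem.Dict.contains_eq_isSome_get? (d := m) (k := kv.1)
      rw [hc] at this
      exact Option.isSome_iff_exists.1 this.symm
    have hmem : (kv.1, old) ∈ m.items := PySem.Dict.mem_items_of_get?_eq_some m hold
    have hgd : m.getD kv.1 [] = old := PySem.Dict.getD_of_get?_eq_some m [] hold
    rw [mem_flattenTree, mem_flattenTree]
    constructor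
    · rintro ⟨p, hp, hx⟩
      rw [PySem.Dict.mem_items_insert] at hp
      rcases hp with rfl | ⟨hp, hne⟩
      · simp only [hgd, PySem.Set.mem_ofList, List.mem_append] at hx
        rcases hx with rfl | hx | hx
        · exact Or.inr (Or.inl rfl)
        · exact Or.inl ⟨(kv.1, old), hmem, Or.inr hx⟩
        · exact Or.inr (Or.inr hx)
      · exact Or.inl ⟨p, hp, hx⟩
    · rintro (⟨p, hp, hx⟩ | hx)
      · by_cases hpk : p.1 = kv.1
        · have hpo : p.2 = old := by
            have h2 : m.get? p.1 = some p.2 := PySem.Dict.get?_of_mem_items m (by exact hp) h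
            rw [hpk, hold] at h2
            exact (Option.some_injective _ h2).symm
          refine ⟨(kv.1, PySem.Set.ofList (m.getD kv.1 [] ++ kv.2)), ?_, ?_⟩
          · rw [PySem.Dict.mem_items_insert]; exact Or.inl rfl
          · rcases hx with rfl | hx
            · exact Or.inl hpk
            · exact Or.inr (by simp only [PySem.Set.mem_ofList, List.mem_append, hgd]; exact Or.inl (hpo ▸ hx))
        · exact ⟨p, by rw [PySem.Dict.mem_items_insert]; exact Or.inr ⟨hp, hpk⟩, hx⟩
      · refine ⟨(kv.1, PySem.Set.ofList (m.getD kv.1 [] ++ kv.2)), ?_, ?_⟩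
        · rw [PySem.Dict.mem_items_insert]; exact Or.inl rfl
        · rcases hx with rfl | hx
          · exact Or.inl rfl
          · exact Or.inr (by simp only [PySem.Set.mem_ofList, List.mem_append]; exact Or.inr hx)
  · rw [Bool.not_eq_true] at hc
    simp only [hc, Bool.false_eq_true, if_false]
    have hne : ∀ p ∈ m.items, p.1 ≠ kv.1 := by
      intro p hp hpk
      have : m.contains kv.1 = true := by
        rw [PySem.Dict.contains_iff_mem_keys]
        exact hpk ▸ PySem.Dict.mem_keys_of_mem_items m hp
      simp [this] at hc
    rw [mem_flattenTree, mem_flattenTree]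
    constructor
    · rintro ⟨p, hp, hx⟩
      rw [PySem.Dict.mem_items_insert] at hp
      rcases hp with rfl | ⟨hp, _⟩
      · tauto
      · exact Or.inl ⟨p, hp, hx⟩
    · rintro (⟨p, hp, hx⟩ | hx)
      · exact ⟨p, by rw [PySem.Dict.mem_items_insert]; exact Or.inr ⟨hp, hne p hp⟩, hx⟩
      · exact ⟨(kv.1, kv.2), by rw [PySem.Dict.mem_items_insert]; exact Or.inl rfl, hx⟩

theorem mergeStep_keys_nodup (m : PySem.Dict Int (List Int)) (kv : Int × List Int) (h : m.keys.Nodup) :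
    (if m.contains kv.1 then m.insert kv.1 (PySem.Set.ofList (m.getD kv.1 [] ++ kv.2)) else m.insert kv.1 kv.2).keys.Nodup := by
  split_ifs <;> exact PySem.Dict.nodup_keys_insert m kv.1 _ h

theorem merge_fold_flat {l : List (Int × List Int)} {m : PySem.Dict Int (List Int)} (h : m.keys.Nodup) (x : Int) :
    x ∈ flattenTree (l.foldl (fun m kv =>
        if m.contains kv.1 then m.insert kv.1 (PySem.Set.ofList (m.getD kv.1 [] ++ kv.2))
        else m.insert kv.1 kv.2) m) ↔
      x ∈ flattenTree m ∨ ∃ p ∈ l, x = p.1 ∨ x ∈ p.2 := by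
  induction l generalizing m with
  | nil => simp
  | cons kv l ih =>
    rw [List.foldl_cons, ih (mergeStep_keys_nodup m kv h), mergeStep_flat m kv h]
    simp [or_assoc]

theorem merge_fold_keys_nodup {l : List (Int × List Int)} {m : PySem.Dict Int (List Int)} (h : m.keys.Nodup) :
    (l.foldl (fun m kv =>
        if m.contains kv.1 then m.insert kv.1 (PySem.Set.ofList (m.getD kv.1 [] ++ kv.2))
        else m.insert kv.1 kv.2) m).keys.Nodup := by
  induction l generalizing m with
  | nil => exact h
  | cons kv l ih => exact ih (mergeStep_keys_nodup m kv h)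

theorem mem_flatten_treeMerge {cur t : PySem.Dict Int (List Int)} (hc : cur.keys.Nodup) {x : Int} :
    x ∈ flattenTree (treeMerge cur t) ↔ x ∈ flattenTree cur ∨ x ∈ bExtra t := by
  rw [treeMerge, merge_fold_flat hc, mem_bExtra]

theorem keys_nodup_treeMerge {cur t : PySem.Dict Int (List Int)} (h : cur.keys.Nodup) :
    (treeMerge cur t).keys.Nodup := merge_fold_keys_nodup h

theorem grown_eq_length_update {nodes extra : PySem.Set Int} (he : extra.Nodup) :
    nodes.length + extra.countP (fun x => !(PySem.Set.contains nodes x)) =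
      (PySem.Set.update nodes extra).length := by
  rw [PySem.Set.update_eq_append_filter]
  simp [PySem.Set.ofList_eq_self_of_nodup _ he, List.countP_eq_length_filter]

theorem length_eq_of_mem_iff {s t : PySem.Set Int} (hs : s.Nodup) (ht : t.Nodup)
    (h : ∀ x, x ∈ s ↔ x ∈ t) : s.length = t.length :=
  ((List.perm_ext_iff_of_nodup hs ht).2 h).length_eq

-- |flatten_tree t| is what Pre_'s per-subtree bound measures
theorem fits_length (t : PySem.Dict Int (List Int)) :
    (PySem.Set.ofList (t.keys ++ t.values.flatten)).length = (flattenTree t).length := by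
  refine length_eq_of_mem_iff (PySem.Set.nodup_ofList _) (nodup_flattenTree t) (fun x => ?_)
  rw [PySem.Set.mem_ofList, mem_flattenTree]
  simp only [List.mem_append, List.mem_flatten, PySem.Dict.keys, PySem.Dict.values, List.mem_map]
  aesop

-- main loop correspondence: A's while loop with state (merged, cur) equals B's fold with state
-- (merged, cur, nodes) whenever nodes is exactly the node set of cur
theorem loop_eq (k : Int) :
    ∀ (rest : List (PySem.Dict Int (List Int))) (fuel : Nat)
      (merged : List (PySem.Dict Int (List Int))) (cur : PySem.Dict Int (List Int))
      (nodes : PySem.Set Int),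
    (∀ t ∈ rest, t.keys.Nodup ∧ ((flattenTree t).length : Int) ≤ k) →
    cur.keys.Nodup → nodes.Nodup →
    (∀ x, x ∈ nodes ↔ x ∈ flattenTree cur) →
    2 * rest.length ≤ fuel →
    kLoopA k fuel merged cur rest =
      (let fin := rest.foldl (bStep k) (merged, cur, nodes);
       if fin.2.1.items.isEmpty then fin.1 else fin.1 ++ [fin.2.1]) := by
  intro rest
  induction rest with
  | nil => intro fuel merged cur nodes _ _ _ _ _; cases fuel <;> rfl
  | cons t rest' ih =>
    intro fuel merged cur nodes hgood hcur hnodes hmem hfuel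
    obtain ⟨f, rfl⟩ : ∃ f, fuel = f + 1 := by
      cases fuel with
      | zero => simp at hfuel
      | succ f => exact ⟨f, rfl⟩
    obtain ⟨hknd, hkfit⟩ := hgood t (List.mem_cons_self)
    have hgood' : ∀ u ∈ rest', u.keys.Nodup ∧ ((flattenTree u).length : Int) ≤ k :=
      fun u hu => hgood u (List.mem_cons_of_mem _ hu)
    have hmnd : (treeMerge cur t).keys.Nodup := keys_nodup_treeMerge hcur
    have hflatm : ∀ x, x ∈ flattenTree (treeMerge cur t) ↔ x ∈ flattenTree cur ∨ x ∈ bExtra t :=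
      fun x => mem_flatten_treeMerge hcur
    have hupd_mem : ∀ x, x ∈ PySem.Set.update nodes (bExtra t) ↔ x ∈ flattenTree (treeMerge cur t) := by
      intro x
      rw [PySem.Set.mem_update, hflatm x, hmem x]
    have hupd_nd : (PySem.Set.update nodes (bExtra t)).Nodup := PySem.Set.nodup_update _ _ hnodes
    have hlen : (PySem.Set.update nodes (bExtra t)).length = (flattenTree (treeMerge cur t)).length :=
      length_eq_of_mem_iff hupd_nd (nodup_flattenTree _) hupd_mem
    have hgrown : (nodes.length : Int) + ((bExtra t).countP (fun x => !(PySem.Set.contains nodes x)) : Int) =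
        ((flattenTree (treeMerge cur t)).length : Int) := by
      rw [← hlen, ← grown_eq_length_update (nodup_bExtra t)]
      push_cast
      ring
    rw [List.foldl_cons]
    by_cases hle : ((flattenTree (treeMerge cur t)).length : Int) ≤ k
    · have hb : bStep k (merged, cur, nodes) t = (merged, treeMerge cur t, PySem.Set.update nodes (bExtra t)) := by
        simp only [bStep, hgrown]
        rw [if_neg (by simp; omega), bMergeIn_eq]
      rw [hb, show kLoopA k (f + 1) merged cur (t :: rest') = kLoopA k f merged (treeMerge cur t) rest' by
            rw [kLoopA]; simp only [hle, if_pos]]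
      exact ih f merged (treeMerge cur t) (PySem.Set.update nodes (bExtra t)) hgood' hmnd hupd_nd hupd_mem (by simp at hfuel ⊢; omega)
    · -- reject: cur must be nonempty, A retries t against an empty current tree and accepts it
      have hextra_len : ((bExtra t).length : Int) ≤ k := by
        have := length_eq_of_mem_iff (nodup_bExtra t) (nodup_flattenTree t)
          (fun x => by rw [mem_bExtra, mem_flattenTree])
        omega
      have hm2 : ∀ x, x ∈ flattenTree (treeMerge PySem.Dict.empty t) ↔ x ∈ bExtra t := by
        intro x
        rw [mem_flatten_treeMerge PySem.Dict.nodup_keys_empty]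
        constructor
        · rintro (hx | hx)
          · rw [mem_flattenTree] at hx; obtain ⟨p, hp, -⟩ := hx; simp [PySem.Dict.empty] at hp
          · exact hx
        · exact Or.inr
      have hm2len : ((flattenTree (treeMerge PySem.Dict.empty t)).length : Int) ≤ k := by
        have := length_eq_of_mem_iff (nodup_flattenTree _) (nodup_bExtra t) hm2
        omega
      have hcne : cur.items.isEmpty = false := by
        rw [List.isEmpty_eq_false_iff]
        intro h0
        apply hle
        have hfc : ∀ x, x ∈ flattenTree cur → False := by
          intro x hx
          rw [mem_flattenTree] at hx
          obtain ⟨p, hp, -⟩ := hx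
          simp [h0] at hp
        have : ∀ x, x ∈ flattenTree (treeMerge cur t) ↔ x ∈ bExtra t := by
          intro x
          rw [hflatm x]
          exact ⟨fun h => h.elim (fun hx => absurd hx (hfc x)) id, Or.inr⟩
        have := length_eq_of_mem_iff (nodup_flattenTree _) (nodup_bExtra t) this
        omega
      obtain ⟨f', rfl⟩ : ∃ f', f = f' + 1 := by
        cases f with
        | zero => simp at hfuel; omega
        | succ f' => exact ⟨f', rfl⟩
      have hb : bStep k (merged, cur, nodes) t =
          (merged ++ [cur], treeMerge PySem.Dict.empty t, PySem.Set.update PySem.Set.empty (bExtra t)) := by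
        simp only [bStep, hgrown]
        rw [if_pos (by simp [hcne]; omega), bMergeIn_eq]
      rw [hb,
          show kLoopA k (f' + 1 + 1) merged cur (t :: rest') =
               kLoopA k (f' + 1) (merged ++ [cur]) PySem.Dict.empty (t :: rest') by
            rw [kLoopA]; simp only [hle, if_false],
          show kLoopA k (f' + 1) (merged ++ [cur]) PySem.Dict.empty (t :: rest') =
               kLoopA k f' (merged ++ [cur]) (treeMerge PySem.Dict.empty t) rest' by
            rw [kLoopA]; simp only [hm2len, if_pos]]
      refine ih f' (merged ++ [cur]) (treeMerge PySem.Dict.empty t)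
        (PySem.Set.update PySem.Set.empty (bExtra t)) hgood' (keys_nodup_treeMerge PySem.Dict.nodup_keys_empty)
        (PySem.Set.nodup_update _ _ List.nodup_nil) ?_ (by simp at hfuel ⊢; omega)
      intro x
      rw [PySem.Set.mem_update, hm2 x]
      simp [PySem.Set.empty]

-- ===== VERDICT (by name: the statement is the Claim_ definition above) =====
theorem k_merger_spec : Claim_equal_k_merger := by
  intro k st _ hpre
  unfold Spec_k_merger k_merger k_merger_alt
  rw [loop_eq k (st.map PySem.Dict.ofList) (2 * st.length + 1) [] PySem.Dict.empty PySem.Set.empty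
        ?_ PySem.Dict.nodup_keys_empty List.nodup_nil ?_ (by simp)]
  · intro t ht
    rw [List.mem_map] at ht
    obtain ⟨l, hl, rfl⟩ := ht
    refine ⟨PySem.Dict.nodup_keys_ofList _, ?_⟩
    have := hpre.1 l hl
    rw [fits_length] at this
    exact this
  · intro x
    simp [PySem.Set.empty, flattenTree, PySem.Dict.empty]
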